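-- pv_equiv track=rewrite | github.com/scscot/tbp | preintake/cleanup-emails.py | choose_best_email
-- ===== SOURCE A (Python) =====
-- def choose_best_email(all_emails_str):
--     """Choose the best email from cleaned list."""
--     if not all_emails_str:
--         return ""
--
--     emails = all_emails_str.split("|")
--
--     # Prefer intake, info, contact, office prefixes
--     prefixes = ["intake@", "info@", "contact@", "office@", "mail@", "hello@", "help@"]
--     for prefix in prefixes:
--         for email in emails:
--             if email.startswith(prefix):
--                 return email
--
--     return emails[0] if emails else ""
-- ===== SOURCE B (Python) =====
-- def choose_best_email(all_emails_str):
--     """Choose the best email from cleaned list."""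
--     if not all_emails_str:
--         return ""
--
--     emails = all_emails_str.split("|")
--     prefixes = ["intake@", "info@", "contact@", "office@", "mail@", "hello@", "help@"]
--
--     def rank(email):
--         for i, p in enumerate(prefixes):
--             if email.startswith(p):
--                 return i
--         return len(prefixes)
--
--     best_email, best_rank = emails[0], len(prefixes)
--     for email in emails:
--         r = rank(email)
--         if r < best_rank:
--             best_email, best_rank = email, r
--     return best_email
-- ===== Notes on version B (the rewrite author's own statement) =====
-- stated objective: faster
-- what changed: Replaces the prefix-major double loop (one full scan of the email list per prefix) by a single pass over the emails that computes each email's prefix rank once and keeps the strictly-best (email, rank) seen so far.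
import Mathlib
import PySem

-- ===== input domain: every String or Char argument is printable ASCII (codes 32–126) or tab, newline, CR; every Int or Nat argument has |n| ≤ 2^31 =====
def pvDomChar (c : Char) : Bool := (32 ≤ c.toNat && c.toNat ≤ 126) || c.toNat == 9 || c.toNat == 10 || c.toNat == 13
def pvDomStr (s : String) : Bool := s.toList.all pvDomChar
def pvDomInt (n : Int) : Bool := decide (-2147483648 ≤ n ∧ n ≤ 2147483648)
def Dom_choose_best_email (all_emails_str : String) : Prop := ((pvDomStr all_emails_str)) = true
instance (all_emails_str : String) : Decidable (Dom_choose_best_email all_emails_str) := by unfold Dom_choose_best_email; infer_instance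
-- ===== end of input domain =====

-- B replaces A's prefix-major double scan by a single pass over the emails that ranks each email
-- once and keeps the strictly-best (email, rank) pair; ties keep the earlier email, as in A.

-- ===== PORT A =====
def pvPrefixes : List String := ["intake@", "info@", "contact@", "office@", "mail@", "hello@", "help@"]

-- outer 'for prefix in prefixes' loop; inner 'for email in emails' scan is find?
def pvALoop (emails : List String) : List String → Option String
  | [] => none
  | p :: ps =>
    match emails.find? (fun e => PySem.Str.startswith e p) with
    | some e => some e
    | none => pvALoop emails ps

def choose_best_email (all_emails_str : String) : String :=
  if all_emails_str = "" then ""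
  else
    let emails := (PySem.Str.split? all_emails_str "|").getD []
    match pvALoop emails pvPrefixes with
    | some e => e
    | none => if emails.isEmpty then "" else PySem.List.pyGetD emails 0 ""

-- ===== PORT B =====
-- rank(email): index of the first prefix it starts with, else len(prefixes)
def pvRank (prefixes : List String) (email : String) : Nat :=
  match prefixes with
  | [] => 0
  | p :: ps => if PySem.Str.startswith email p then 0 else pvRank ps email + 1

-- one step of B's single pass: keep the strictly better ranked email
def pvStep (prefixes : List String) (best : String × Nat) (email : String) : String × Nat :=
  let r := pvRank prefixes email
  if r < best.2 then (email, r) else best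

def choose_best_email_alt (all_emails_str : String) : String :=
  if all_emails_str = "" then ""
  else
    let emails := (PySem.Str.split? all_emails_str "|").getD []
    (emails.foldl (pvStep pvPrefixes) (PySem.List.pyGetD emails 0 "", pvPrefixes.length)).1

-- ===== PRECONDITION & SPEC =====
def Spec_choose_best_email (all_emails_str : String) (out : String) : Prop := out = choose_best_email_alt all_emails_str
instance (all_emails_str : String) (out : String) : Decidable (Spec_choose_best_email all_emails_str out) := by unfold Spec_choose_best_email; infer_instance

-- ===== CLAIM (what is proved, stated in full; the proofs are below) =====
def Claim_equal_choose_best_email : Prop := ∀ (all_emails_str : String), Dom_choose_best_email all_emails_str → Spec_choose_best_email all_emails_str (choose_best_email all_emails_str)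

-- ===== LEMMAS AND PROOFS =====

theorem pvFoldrMin_le (l : List Nat) (b : Nat) : l.foldr min b ≤ b := by
  induction l with
  | nil => exact Nat.le_refl b
  | cons x tl ih => exact le_trans (Nat.min_le_right x _) ih

theorem pvFoldrMin_le_mem (l : List Nat) (b x : Nat) (hx : x ∈ l) : l.foldr min b ≤ x := by
  induction l with
  | nil => cases hx
  | cons y tl ih =>
    rcases List.mem_cons.mp hx with h | h
    · subst h; exact Nat.min_le_left x _
    · exact le_trans (Nat.min_le_right y _) (ih h)

theorem pvFoldrMin_mem (l : List Nat) (b : Nat) : l.foldr min b = b ∨ l.foldr min b ∈ l := by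
  induction l with
  | nil => exact Or.inl rfl
  | cons x tl ih =>
    rcases Nat.le_total x (tl.foldr min b) with h | h
    · right
      simp only [List.foldr_cons, Nat.min_eq_left h]
      exact List.mem_cons_self
    · simp only [List.foldr_cons, Nat.min_eq_right h]
      rcases ih with h' | h'
      · exact Or.inl h'
      · exact Or.inr (List.mem_cons_of_mem _ h')

theorem pvFoldrMin_min (l : List Nat) (a b : Nat) :
    l.foldr min (min a b) = min a (l.foldr min b) := by
  induction l with
  | nil => rfl
  | cons x tl ih =>
    simp only [List.foldr_cons, ih]
    omega

theorem pvFoldrMin_map_succ (l : List Nat) (b : Nat) :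
    (l.map (· + 1)).foldr min (b + 1) = l.foldr min b + 1 := by
  induction l with
  | nil => rfl
  | cons x tl ih =>
    simp only [List.map_cons, List.foldr_cons, ih]
    omega

theorem pvFind?_congr {α : Type} (l : List α) (p q : α → Bool)
    (h : ∀ x ∈ l, p x = q x) : l.find? p = l.find? q := by
  induction l with
  | nil => rfl
  | cons x tl ih =>
    simp only [List.find?_cons, h x List.mem_cons_self]
    cases q x with
    | true => rfl
    | false => exact ih fun y hy => h y (List.mem_cons_of_mem _ hy)

-- B's fold characterised: second component is the capped minimum rank, first the first argmin
theorem pvRank_cons (p : String) (ps : List String) (e : String) :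
    pvRank (p :: ps) e = if PySem.Str.startswith e p = true then 0 else pvRank ps e + 1 := rfl

-- B's fold characterised: second component is the capped minimum rank, first the first argmin
theorem pvFold_char (ps : List String) (es : List String) (b : String) (r : Nat) :
    es.foldl (pvStep ps) (b, r) =
      (if (es.map (pvRank ps)).foldr min r < r
        then (es.find? (fun e => pvRank ps e == (es.map (pvRank ps)).foldr min r)).getD b
        else b,
       (es.map (pvRank ps)).foldr min r) := by
  induction es generalizing b r with
  | nil => simp
  | cons e tl ih =>
    simp only [List.foldl_cons, List.map_cons, List.foldr_cons]
    by_cases h : pvRank ps e < r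
    · have hstep : pvStep ps (b, r) e = (e, pvRank ps e) := by
        simp [pvStep, h]
      rw [hstep, ih]
      have hM : (tl.map (pvRank ps)).foldr min (pvRank ps e) =
          min (pvRank ps e) ((tl.map (pvRank ps)).foldr min r) := by
        have h2 := pvFoldrMin_min (tl.map (pvRank ps)) (pvRank ps e) r
        rw [Nat.min_eq_left (le_of_lt h)] at h2
        exact h2
      rw [hM]
      set M := (tl.map (pvRank ps)).foldr min r with hMdef
      by_cases he : pvRank ps e = min (pvRank ps e) M
      · -- e itself achieves the minimum
        rw [← he]
        rw [if_neg (Nat.lt_irrefl _), if_pos h,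
          List.find?_cons_of_pos (by simp)]
        rfl
      · have hlt : min (pvRank ps e) M < pvRank ps e := by omega
        have hMlt : min (pvRank ps e) M < r := lt_trans hlt h
        rw [if_pos hlt, if_pos hMlt,
          List.find?_cons_of_neg (by simp; omega)]
        -- the min is attained in tl, so find? succeeds and the default is irrelevant
        have hMmem : min (pvRank ps e) M ∈ tl.map (pvRank ps) := by
          have hminM : min (pvRank ps e) M = M := by omega
          rcases pvFoldrMin_mem (tl.map (pvRank ps)) r with h' | h'
          · rw [hminM] at hMlt
            exact absurd (hMdef.trans h') (by omega)
          · rw [hminM]; exact h'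
        rcases List.mem_map.mp hMmem with ⟨x, hxmem, hxr⟩
        have hsome : (tl.find? (fun z => pvRank ps z == min (pvRank ps e) M)).isSome := by
          rw [List.find?_isSome]
          exact ⟨x, hxmem, by simp [hxr]⟩
        rcases Option.isSome_iff_exists.mp hsome with ⟨y, hy⟩
        rw [hy]
        rfl
    · have hstep : pvStep ps (b, r) e = (b, r) := by
        simp [pvStep, h]
      rw [hstep, ih]
      set M := (tl.map (pvRank ps)).foldr min r with hMdef
      have hMr : M ≤ r := pvFoldrMin_le _ _
      have hmin : min (pvRank ps e) M = M := by omega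
      rw [hmin]
      by_cases hc : M < r
      · rw [if_pos hc, if_pos hc, List.find?_cons_of_neg (by simp; omega)]
      · rw [if_neg hc, if_neg hc]

-- rank is 0 exactly on a match with the head prefix
theorem pvRank_cons_zero (p : String) (ps : List String) (e : String) :
    (pvRank (p :: ps) e == 0) = PySem.Str.startswith e p := by
  rw [pvRank_cons]
  by_cases h : PySem.Str.startswith e p = true
  · rw [if_pos h, h]; rfl
  · rw [if_neg h]
    simp only [Bool.not_eq_true] at h
    rw [h]; simp

-- A's double loop characterised: first email of minimal rank, if any prefix matches at all
theorem pvALoop_char (ps : List String) (es : List String) :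
    pvALoop es ps =
      (if (es.map (pvRank ps)).foldr min ps.length < ps.length
        then es.find? (fun e => pvRank ps e == (es.map (pvRank ps)).foldr min ps.length)
        else none) := by
  induction ps with
  | nil => simp [pvALoop]
  | cons p ps ih =>
    cases hfind : es.find? (fun e => PySem.Str.startswith e p) with
    | some e0 =>
      have he0mem : e0 ∈ es := List.mem_of_find?_eq_some hfind
      have he0sw : PySem.Str.startswith e0 p = true := by
        have h2 := List.find?_some hfind
        simpa using h2
      have hr0 : pvRank (p :: ps) e0 = 0 := by rw [pvRank_cons, if_pos he0sw]
      have h0mem : (0 : Nat) ∈ es.map (pvRank (p :: ps)) :=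
        List.mem_map.mpr ⟨e0, he0mem, hr0⟩
      have hm0 : (es.map (pvRank (p :: ps))).foldr min (p :: ps).length = 0 :=
        Nat.le_zero.mp (pvFoldrMin_le_mem _ _ _ h0mem)
      rw [hm0, if_pos (by simp)]
      have hcong : es.find? (fun e => pvRank (p :: ps) e == 0) =
          es.find? (fun e => PySem.Str.startswith e p) :=
        pvFind?_congr _ _ _ fun x _ => pvRank_cons_zero p ps x
      simp only [pvALoop, hfind, hcong]
    | none =>
      have hall : ∀ e ∈ es, PySem.Str.startswith e p = false := by
        intro e he
        simpa using List.find?_eq_none.mp hfind e he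
      have hrank : ∀ e ∈ es, pvRank (p :: ps) e = pvRank ps e + 1 := by
        intro e he
        rw [pvRank_cons, if_neg (by rw [hall e he]; simp)]
      have hmap : es.map (pvRank (p :: ps)) = (es.map (pvRank ps)).map (· + 1) := by
        rw [List.map_map]
        exact List.map_congr_left hrank
      have hm : (es.map (pvRank (p :: ps))).foldr min (ps.length + 1) =
          (es.map (pvRank ps)).foldr min ps.length + 1 := by
        rw [hmap, pvFoldrMin_map_succ]
      simp only [pvALoop, hfind]
      rw [ih, show (p :: ps).length = ps.length + 1 from rfl, hm]
      set m := (es.map (pvRank ps)).foldr min ps.length with hmdef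
      by_cases hc : m < ps.length
      · rw [if_pos hc, if_pos (by omega : m + 1 < ps.length + 1)]
        exact pvFind?_congr _ _ _ fun x hx => by rw [hrank x hx]; simp
      · rw [if_neg hc, if_neg (by omega : ¬ m + 1 < ps.length + 1)]

-- the bridge on an arbitrary email list
theorem pvMain (es : List String) :
    (match pvALoop es pvPrefixes with
     | some e => e
     | none => if es.isEmpty then "" else PySem.List.pyGetD es 0 "") =
    (es.foldl (pvStep pvPrefixes) (PySem.List.pyGetD es 0 "", pvPrefixes.length)).1 := by
  rw [pvALoop_char, pvFold_char]
  set m := (es.map (pvRank pvPrefixes)).foldr min pvPrefixes.length with hmdef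
  by_cases hc : m < pvPrefixes.length
  · rw [if_pos hc, if_pos hc]
    have hmem : m ∈ es.map (pvRank pvPrefixes) := by
      rcases pvFoldrMin_mem (es.map (pvRank pvPrefixes)) pvPrefixes.length with h | h
      · omega
      · exact h
    rcases List.mem_map.mp hmem with ⟨x, hxmem, hxr⟩
    have : (es.find? (fun e => pvRank pvPrefixes e == m)).isSome := by
      rw [List.find?_isSome]
      exact ⟨x, hxmem, by simp [hxr]⟩
    rcases Option.isSome_iff_exists.mp this with ⟨y, hy⟩
    rw [hy]
    rfl
  · rw [if_neg hc, if_neg hc]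
    cases es with
    | nil => rfl
    | cons e tl => rfl

-- ===== VERDICT (by name: the statement is the Claim_ definition above) =====
theorem choose_best_email_spec : Claim_equal_choose_best_email := by
  intro s _
  unfold Spec_choose_best_email choose_best_email choose_best_email_alt
  by_cases hs : s = ""
  · simp [hs]
  · rw [if_neg hs, if_neg hs]
    exact pvMain _
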